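-- pv_equiv track=rewrite | github.com/S2R2I-LIFE/RaspberryFluke | raspberryfluke.py | is_endpoint_device
-- ===== SOURCE A (Python) =====
-- def is_endpoint_device(kv):
--     """
--     Intelligently filters out IP Phones, Voice Controllers, and APs.
--     Returns True if the data belongs to an endpoint, False if it's a switch.
--     """
--     # 1. Check standardized LLDP capabilities first
--     for k, v in kv.items():
--         if v == "on":
--             # If it explicitly says it is a Switch (Bridge) or Router, allow it.
--             if "Bridge.enabled" in k or "Router.enabled" in k:
--                 return False
--
--     for k, v in kv.items():
--         if v == "on":
--             # If it explicitly identifies as a Phone, AP, or Station, block it.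
--             if "Telephone.enabled" in k or "Wlan.enabled" in k or "Station.enabled" in k:
--                 return True
--
--     # 2. Heuristic fallback (CDP often relies on description strings instead of capabilities)
--     for k, v in kv.items():
--         if "descr" in k.lower() or "name" in k.lower():
--             val = v.lower()
--             # If it's running a known switch OS, allow it
--             if "ios " in val or "junos" in val or "arista" in val or "nexus" in val or "catalyst" in val:
--                 return False
--             # If it explicitly says phone or voice controller, block it
--             if "phone" in val or "voice controller" in val or "polycom" in val or "access point" in val:
--                 return True
--
--     # 3. Default to False (Allow) so we don't accidentally blind the tool to unknown switches
--     return False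
-- ===== SOURCE B (Python) =====
-- def is_endpoint_device(kv):
--     """Single pass: accumulate capability flags and the first descr/name verdict,
--     then resolve by priority."""
--     has_switch_cap = False
--     has_endpoint_cap = False
--     descr_result = None
--     for k, v in kv.items():
--         if v == "on":
--             if "Bridge.enabled" in k or "Router.enabled" in k:
--                 has_switch_cap = True
--             if "Telephone.enabled" in k or "Wlan.enabled" in k or "Station.enabled" in k:
--                 has_endpoint_cap = True
--         if descr_result is None and ("descr" in k.lower() or "name" in k.lower()):
--             val = v.lower()
--             if "ios " in val or "junos" in val or "arista" in val or "nexus" in val or "catalyst" in val: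
--                 descr_result = False
--             elif "phone" in val or "voice controller" in val or "polycom" in val or "access point" in val:
--                 descr_result = True
--     if has_switch_cap:
--         return False
--     if has_endpoint_cap:
--         return True
--     if descr_result is not None:
--         return descr_result
--     return False
-- ===== Notes on version B (the rewrite author's own statement) =====
-- stated objective: alternative
-- what changed: Replaces A's three priority-ordered scans with early returns by one single pass that accumulates two capability flags and the first descr/name verdict, resolved by a decision tree after the loop.
import Mathlib
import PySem

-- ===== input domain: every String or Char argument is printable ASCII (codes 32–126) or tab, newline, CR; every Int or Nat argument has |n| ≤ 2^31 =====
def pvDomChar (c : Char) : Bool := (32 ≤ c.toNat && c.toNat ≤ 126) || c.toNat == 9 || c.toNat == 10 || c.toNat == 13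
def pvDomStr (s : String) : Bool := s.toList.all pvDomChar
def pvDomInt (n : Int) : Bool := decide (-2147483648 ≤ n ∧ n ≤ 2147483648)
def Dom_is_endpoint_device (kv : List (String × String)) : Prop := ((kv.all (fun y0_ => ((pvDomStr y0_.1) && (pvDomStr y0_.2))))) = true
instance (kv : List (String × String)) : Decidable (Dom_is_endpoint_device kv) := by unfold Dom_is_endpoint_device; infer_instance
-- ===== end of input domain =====

-- B replaces A's three priority-ordered scans with early returns by a single pass
-- accumulating flags plus the first descr/name verdict, resolved after the loop
-- (alternative decomposition, same asymptotic cost).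

-- ===== PORT A =====
-- first scan: return False on an 'on' Bridge/Router capability
def pvLoopA1 : List (String × String) → Option Bool
  | [] => none
  | (k, v) :: rest =>
    if v == "on" then
      if PySem.Str.isIn "Bridge.enabled" k || PySem.Str.isIn "Router.enabled" k then
        some false
      else pvLoopA1 rest
    else pvLoopA1 rest

-- second scan: return True on an 'on' Telephone/Wlan/Station capability
def pvLoopA2 : List (String × String) → Option Bool
  | [] => none
  | (k, v) :: rest =>
    if v == "on" then
      if PySem.Str.isIn "Telephone.enabled" k || PySem.Str.isIn "Wlan.enabled" k
          || PySem.Str.isIn "Station.enabled" k then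
        some true
      else pvLoopA2 rest
    else pvLoopA2 rest

-- third scan: heuristic on descr/name values
def pvLoopA3 : List (String × String) → Option Bool
  | [] => none
  | (k, v) :: rest =>
    if PySem.Str.isIn "descr" (PySem.Str.lower k) || PySem.Str.isIn "name" (PySem.Str.lower k) then
      let val := PySem.Str.lower v
      if PySem.Str.isIn "ios " val || PySem.Str.isIn "junos" val || PySem.Str.isIn "arista" val
          || PySem.Str.isIn "nexus" val || PySem.Str.isIn "catalyst" val then
        some false
      else if PySem.Str.isIn "phone" val || PySem.Str.isIn "voice controller" val
          || PySem.Str.isIn "polycom" val || PySem.Str.isIn "access point" val then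
        some true
      else pvLoopA3 rest
    else pvLoopA3 rest

def is_endpoint_device (kv : List (String × String)) : Bool :=
  match pvLoopA1 kv with
  | some b => b
  | none =>
    match pvLoopA2 kv with
    | some b => b
    | none =>
      match pvLoopA3 kv with
      | some b => b
      | none => false

-- ===== PORT B =====
-- single pass with accumulators (has_switch_cap, has_endpoint_cap, descr_result)
def pvAltLoop : List (String × String) → Bool → Bool → Option Bool → Bool
  | [], hs, he, dr => if hs then false else if he then true else dr.getD false
  | (k, v) :: rest, hs, he, dr =>
    let hs' := if v == "on" &&
        (PySem.Str.isIn "Bridge.enabled" k || PySem.Str.isIn "Router.enabled" k) then true else hs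
    let he' := if v == "on" &&
        (PySem.Str.isIn "Telephone.enabled" k || PySem.Str.isIn "Wlan.enabled" k
          || PySem.Str.isIn "Station.enabled" k) then true else he
    let dr' :=
      if dr.isNone &&
          (PySem.Str.isIn "descr" (PySem.Str.lower k) || PySem.Str.isIn "name" (PySem.Str.lower k)) then
        let val := PySem.Str.lower v
        if PySem.Str.isIn "ios " val || PySem.Str.isIn "junos" val || PySem.Str.isIn "arista" val
            || PySem.Str.isIn "nexus" val || PySem.Str.isIn "catalyst" val then
          some false
        else if PySem.Str.isIn "phone" val || PySem.Str.isIn "voice controller" val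
            || PySem.Str.isIn "polycom" val || PySem.Str.isIn "access point" val then
          some true
        else dr
      else dr
    pvAltLoop rest hs' he' dr'

def is_endpoint_device_alt (kv : List (String × String)) : Bool :=
  pvAltLoop kv false false none

-- ===== PRECONDITION & SPEC =====
def Spec_is_endpoint_device (kv : List (String × String)) (out : Bool) : Prop := out = is_endpoint_device_alt kv
instance (kv : List (String × String)) (out : Bool) : Decidable (Spec_is_endpoint_device kv out) := by unfold Spec_is_endpoint_device; infer_instance

-- ===== CLAIM (what is proved, stated in full; the proofs are below) =====
def Claim_equal_is_endpoint_device : Prop := ∀ (kv : List (String × String)), Dom_is_endpoint_device kv → Spec_is_endpoint_device kv (is_endpoint_device kv)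

-- ===== LEMMAS AND PROOFS =====

-- unfolding of one step of each of A's scans into guarded form
theorem pvLoopA1_cons (k v : String) (rest : List (String × String)) :
    pvLoopA1 ((k, v) :: rest) =
      if v == "on" && (PySem.Str.isIn "Bridge.enabled" k || PySem.Str.isIn "Router.enabled" k) then
        some false
      else pvLoopA1 rest := by
  rw [pvLoopA1]
  by_cases h : (v == "on") = true <;>
    by_cases h2 : (PySem.Str.isIn "Bridge.enabled" k || PySem.Str.isIn "Router.enabled" k) = true <;>
    simp [h, h2]

theorem pvLoopA2_cons (k v : String) (rest : List (String × String)) :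
    pvLoopA2 ((k, v) :: rest) =
      if v == "on" && (PySem.Str.isIn "Telephone.enabled" k || PySem.Str.isIn "Wlan.enabled" k
          || PySem.Str.isIn "Station.enabled" k) then
        some true
      else pvLoopA2 rest := by
  rw [pvLoopA2]
  by_cases h : (v == "on") = true <;>
    by_cases h2 : (PySem.Str.isIn "Telephone.enabled" k || PySem.Str.isIn "Wlan.enabled" k
        || PySem.Str.isIn "Station.enabled" k) = true <;>
    simp [h, h2]

theorem pvLoopA3_cons (k v : String) (rest : List (String × String)) :
    pvLoopA3 ((k, v) :: rest) =
      if PySem.Str.isIn "descr" (PySem.Str.lower k) || PySem.Str.isIn "name" (PySem.Str.lower k) then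
        if PySem.Str.isIn "ios " (PySem.Str.lower v) || PySem.Str.isIn "junos" (PySem.Str.lower v)
            || PySem.Str.isIn "arista" (PySem.Str.lower v) || PySem.Str.isIn "nexus" (PySem.Str.lower v)
            || PySem.Str.isIn "catalyst" (PySem.Str.lower v) then
          some false
        else if PySem.Str.isIn "phone" (PySem.Str.lower v) || PySem.Str.isIn "voice controller" (PySem.Str.lower v)
            || PySem.Str.isIn "polycom" (PySem.Str.lower v) || PySem.Str.isIn "access point" (PySem.Str.lower v) then
          some true
        else pvLoopA3 rest
      else pvLoopA3 rest := by
  rw [pvLoopA3]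

-- the purely boolean shape of one loop step, checked exhaustively
theorem pvStep : ∀ (c1 c2 cd cs cp hs he : Bool) (dr r1 r2 r3 : Option Bool),
    (if (if c1 then true else hs) then false
     else match r1 with
     | some b => b
     | none =>
       if (if c2 then true else he) then true
       else match r2 with
       | some b => b
       | none =>
         (((if dr.isNone && cd then (if cs then some false else if cp then some true else dr) else dr)).orElse
           (fun _ => r3)).getD false)
    =
    (if hs then false
     else match (if c1 then some false else r1) with
     | some b => b
     | none =>
       if he then true
       else match (if c2 then some true else r2) with
       | some b => b
       | none =>
         (dr.orElse (fun _ => if cd then (if cs then some false else if cp then some true else r3) else r3)).getD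
           false) := by
  decide

-- the invariant: the single pass with accumulators computes the three-scan result,
-- with the accumulators taking priority layer by layer
theorem pvAltLoop_eq (kv : List (String × String)) :
    ∀ (hs he : Bool) (dr : Option Bool),
    pvAltLoop kv hs he dr =
      if hs then false
      else match pvLoopA1 kv with
      | some b => b
      | none =>
        if he then true
        else match pvLoopA2 kv with
        | some b => b
        | none => (dr.orElse (fun _ => pvLoopA3 kv)).getD false := by
  induction kv with
  | nil =>
    intro hs he dr
    cases dr <;> simp [pvAltLoop, pvLoopA1, pvLoopA2, pvLoopA3, Option.orElse]
  | cons p rest ih =>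
    intro hs he dr
    obtain ⟨k, v⟩ := p
    rw [pvAltLoop, ih, pvLoopA1_cons, pvLoopA2_cons, pvLoopA3_cons]
    exact pvStep ((v == "on") && (PySem.Str.isIn "Bridge.enabled" k || PySem.Str.isIn "Router.enabled" k))
      ((v == "on") && (PySem.Str.isIn "Telephone.enabled" k || PySem.Str.isIn "Wlan.enabled" k
        || PySem.Str.isIn "Station.enabled" k))
      (PySem.Str.isIn "descr" (PySem.Str.lower k) || PySem.Str.isIn "name" (PySem.Str.lower k))
      (PySem.Str.isIn "ios " (PySem.Str.lower v) || PySem.Str.isIn "junos" (PySem.Str.lower v)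
        || PySem.Str.isIn "arista" (PySem.Str.lower v) || PySem.Str.isIn "nexus" (PySem.Str.lower v)
        || PySem.Str.isIn "catalyst" (PySem.Str.lower v))
      (PySem.Str.isIn "phone" (PySem.Str.lower v) || PySem.Str.isIn "voice controller" (PySem.Str.lower v)
        || PySem.Str.isIn "polycom" (PySem.Str.lower v) || PySem.Str.isIn "access point" (PySem.Str.lower v))
      hs he dr (pvLoopA1 rest) (pvLoopA2 rest) (pvLoopA3 rest)

-- ===== VERDICT (by name: the statement is the Claim_ definition above) =====
theorem is_endpoint_device_spec : Claim_equal_is_endpoint_device := by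
  intro kv _
  unfold Spec_is_endpoint_device is_endpoint_device is_endpoint_device_alt
  rw [pvAltLoop_eq]
  cases pvLoopA1 kv <;> cases pvLoopA2 kv <;> cases pvLoopA3 kv <;> simp [Option.orElse]
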